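-- pv_equiv track=rewrite | github.com/zxjAiLun/keqing1 | scripts/run_keqingrl_paired_candidate_eval.py | _filter_candidate_rows
-- ===== SOURCE A (Python) =====
-- def _filter_candidate_rows(
--     rows: list[dict[str, str]],
--     source_config_ids: list[int] | None,
--     rerun_config_ids: list[int] | None,
-- ) -> list[dict[str, str]]:
--     if source_config_ids is not None:
--         source_set = {int(value) for value in source_config_ids}
--         rows = [row for row in rows if int(row["source_config_id"]) in source_set]
--     if rerun_config_ids is not None:
--         rerun_set = {int(value) for value in rerun_config_ids}
--         rows = [row for row in rows if int(row["rerun_config_id"]) in rerun_set]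
--     return rows
-- ===== SOURCE B (Python) =====
-- def _filter_candidate_rows(
--     rows: list[dict[str, str]],
--     source_config_ids: list[int] | None,
--     rerun_config_ids: list[int] | None,
-- ) -> list[dict[str, str]]:
--     # Table-driven: build the list of active (key, allowed-set) criteria once,
--     # then a single accumulator pass keeps a row iff it satisfies all criteria
--     # in order (all() short-circuits, so rerun_config_id is only read on rows
--     # that passed the source criterion, as in the staged version).
--     criteria = [
--         (key, {int(v) for v in ids})
--         for key, ids in (
--             ("source_config_id", source_config_ids),
--             ("rerun_config_id", rerun_config_ids),
--         )
--         if ids is not None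
--     ]
--     kept = []
--     for row in rows:
--         if all(int(row[key]) in allowed for key, allowed in criteria):
--             kept.append(row)
--     return kept
-- ===== Notes on version B (the rewrite author's own statement) =====
-- stated objective: alternative
-- what changed: Replaces the two hard-coded sequential filtering passes with a table-driven design: a criteria list of (key, allowed-set) pairs is built once and a single accumulator loop keeps a row iff a generic all() over the criteria succeeds (short-circuiting in the same order).
import Mathlib
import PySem

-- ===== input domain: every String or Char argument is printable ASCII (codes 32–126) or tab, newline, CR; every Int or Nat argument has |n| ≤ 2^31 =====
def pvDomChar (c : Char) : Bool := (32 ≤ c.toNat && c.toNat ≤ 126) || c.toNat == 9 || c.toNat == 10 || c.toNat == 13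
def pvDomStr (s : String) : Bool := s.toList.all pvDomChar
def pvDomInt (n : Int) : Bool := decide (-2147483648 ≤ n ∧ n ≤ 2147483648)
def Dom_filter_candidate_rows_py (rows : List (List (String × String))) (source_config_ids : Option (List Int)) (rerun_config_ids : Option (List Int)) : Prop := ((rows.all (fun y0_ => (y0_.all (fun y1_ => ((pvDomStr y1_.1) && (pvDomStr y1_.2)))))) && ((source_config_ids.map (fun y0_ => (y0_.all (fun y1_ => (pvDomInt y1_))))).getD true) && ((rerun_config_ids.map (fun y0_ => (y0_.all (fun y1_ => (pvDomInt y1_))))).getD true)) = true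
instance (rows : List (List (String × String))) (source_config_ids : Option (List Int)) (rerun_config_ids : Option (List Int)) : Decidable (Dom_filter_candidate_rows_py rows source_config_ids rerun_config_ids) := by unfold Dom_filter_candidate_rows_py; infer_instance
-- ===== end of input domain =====

-- B replaces A's two hard-coded staged passes with a table-driven criteria list and one
-- accumulator pass (objective: alternative). Return value only; neither version mutates arguments.

-- ===== PORT A =====
-- int(row[key]): first-match lookup in the row (dict), then Python int(); none = KeyError / ValueError
def pvRowInt? (row : List (String × String)) (key : String) : Option Int :=
  (List.lookup key row).bind PySem.Int.ofStr?

def filter_candidate_rows_py (rows : List (List (String × String))) (source_config_ids : Option (List Int)) (rerun_config_ids : Option (List Int)) : List (List (String × String)) :=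
  let rows1 :=
    match source_config_ids with
    | none => rows
    | some ids =>
        let source_set : PySem.Set Int := PySem.Set.ofList ids
        rows.filter (fun row =>
          match pvRowInt? row "source_config_id" with
          | some v => PySem.Set.contains source_set v
          | none => false)
  match rerun_config_ids with
  | none => rows1
  | some ids =>
      let rerun_set : PySem.Set Int := PySem.Set.ofList ids
      rows1.filter (fun row =>
        match pvRowInt? row "rerun_config_id" with
        | some v => PySem.Set.contains rerun_set v
        | none => false)

-- ===== PORT B =====
-- one criterion check: int(row[key]) in allowed (none lookup/parse = the Python raise)
def pvCritOk (row : List (String × String)) (c : String × PySem.Set Int) : Bool :=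
  match pvRowInt? row c.1 with
  | some v => PySem.Set.contains c.2 v
  | none => false

def filter_candidate_rows_py_alt (rows : List (List (String × String))) (source_config_ids : Option (List Int)) (rerun_config_ids : Option (List Int)) : List (List (String × String)) :=
  -- criteria = [(key, {int(v) for v in ids}) for key, ids in (…) if ids is not None]
  let criteria : List (String × PySem.Set Int) :=
    ([("source_config_id", source_config_ids), ("rerun_config_id", rerun_config_ids)]).filterMap
      (fun p => p.2.map (fun ids => (p.1, PySem.Set.ofList ids)))
  -- for row in rows: if all(...): kept.append(row)
  rows.foldl (fun kept row => if criteria.all (pvCritOk row) then kept ++ [row] else kept) []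

-- ===== PRECONDITION & SPEC =====
-- helper for Pre_ (independent of both ports)
def pvSrcPass (source_config_ids : Option (List Int)) (row : List (String × String)) : Bool :=
  match source_config_ids with
  | none => true
  | some ids =>
      match (List.lookup "source_config_id" row).bind PySem.Int.ofStr? with
      | some v => List.contains ids v
      | none => false

-- Pre_ excludes exactly the inputs where Python A raises: a row reached by a filter whose key is
-- missing (KeyError) or whose value int() rejects (ValueError); the rerun key is only read on rows
-- that passed the source filter.
def Pre_filter_candidate_rows_py (rows : List (List (String × String))) (source_config_ids : Option (List Int)) (rerun_config_ids : Option (List Int)) : Prop :=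
  (source_config_ids.isSome = true →
    ∀ row ∈ rows, ((List.lookup "source_config_id" row).bind PySem.Int.ofStr?).isSome = true) ∧
  (rerun_config_ids.isSome = true →
    ∀ row ∈ rows, pvSrcPass source_config_ids row = true →
      ((List.lookup "rerun_config_id" row).bind PySem.Int.ofStr?).isSome = true)
instance (rows : List (List (String × String))) (source_config_ids : Option (List Int)) (rerun_config_ids : Option (List Int)) : Decidable (Pre_filter_candidate_rows_py rows source_config_ids rerun_config_ids) := by unfold Pre_filter_candidate_rows_py; infer_instance

def pvWitness_filter_candidate_rows_py : (List (List (String × String))) × Option (List Int) × Option (List Int) :=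
  ([[("source_config_id", "1"), ("rerun_config_id", "2")], [("source_config_id", "3")]],
   some [1, 2], some [2])

def Spec_filter_candidate_rows_py (rows : List (List (String × String))) (source_config_ids : Option (List Int)) (rerun_config_ids : Option (List Int)) (out : List (List (String × String))) : Prop := out = filter_candidate_rows_py_alt rows source_config_ids rerun_config_ids
instance (rows : List (List (String × String))) (source_config_ids : Option (List Int)) (rerun_config_ids : Option (List Int)) (out : List (List (String × String))) : Decidable (Spec_filter_candidate_rows_py rows source_config_ids rerun_config_ids out) := by unfold Spec_filter_candidate_rows_py; infer_instance

-- ===== CLAIM =====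
def Claim_equal_filter_candidate_rows_py : Prop := ∀ (rows : List (List (String × String))) (source_config_ids : Option (List Int)) (rerun_config_ids : Option (List Int)), Dom_filter_candidate_rows_py rows source_config_ids rerun_config_ids → Pre_filter_candidate_rows_py rows source_config_ids rerun_config_ids → Spec_filter_candidate_rows_py rows source_config_ids rerun_config_ids (filter_candidate_rows_py rows source_config_ids rerun_config_ids)

-- ===== LEMMAS AND PROOFS =====

-- ===== VERDICT =====
theorem filter_candidate_rows_py_spec : Claim_equal_filter_candidate_rows_py := by
  intro rows src rer _ _
  unfold Spec_filter_candidate_rows_py filter_candidate_rows_py filter_candidate_rows_py_alt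
  simp only [PySem.List.foldl_append_if_eq_filter, List.nil_append]
  cases src <;> cases rer <;>
    simp [pvCritOk, List.filter_filter, Bool.and_comm]
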